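-- pv_equiv track=rewrite | github.com/FisherXZ/lead-gen-agent | agent/src/runtime/compactor.py | _extract_highlights
-- ===== SOURCE A (Python) =====
-- def _format_summary(summary: str) -> str:
--     """Convert <summary>...</summary> XML to plain readable text.
--
--     Strips the XML tags and prepends 'Summary:\\n'.
--     Falls back to returning the string as-is if tags aren't present.
--     """
--     if "<summary>" in summary and "</summary>" in summary:
--         start = summary.find("<summary>") + len("<summary>")
--         end = summary.find("</summary>")
--         inner = summary[start:end].strip()
--         return "Summary:\n" + inner
--     return summary.strip()
--
-- def _extract_highlights(summary: str) -> list[str]: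
--     """Return all non-timeline bullet lines from a summary string."""
--     formatted = _format_summary(summary)
--     lines: list[str] = []
--     in_timeline = False
--     for line in formatted.splitlines():
--         stripped = line.rstrip()
--         if not stripped or stripped in ("Summary:", "Conversation summary:"):
--             continue
--         if stripped == "- Key timeline:":
--             in_timeline = True
--             continue
--         if in_timeline:
--             continue
--         lines.append(stripped)
--     return lines
-- ===== SOURCE B (Python) =====
-- def _format_summary(summary: str) -> str:
--     if "<summary>" in summary and "</summary>" in summary:
--         start = summary.find("<summary>") + len("<summary>")
--         end = summary.find("</summary>")
--         inner = summary[start:end].strip()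
--         return "Summary:\n" + inner
--     return summary.strip()
--
-- def _extract_highlights(summary: str) -> list[str]:
--     lines = [ln.rstrip() for ln in _format_summary(summary).splitlines()]
--     if "- Key timeline:" in lines:
--         lines = lines[: lines.index("- Key timeline:")]
--     return [ln for ln in lines if ln and ln not in ("Summary:", "Conversation summary:")]
-- ===== Notes on version B (the rewrite author's own statement) =====
-- stated objective: simpler
-- what changed: Replaces the stateful in_timeline flag loop by a locate-then-filter decomposition: rstrip all lines, truncate the list at the first '- Key timeline:' marker via index/slicing, then keep the non-empty non-header lines with one comprehension.
import Mathlib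
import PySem

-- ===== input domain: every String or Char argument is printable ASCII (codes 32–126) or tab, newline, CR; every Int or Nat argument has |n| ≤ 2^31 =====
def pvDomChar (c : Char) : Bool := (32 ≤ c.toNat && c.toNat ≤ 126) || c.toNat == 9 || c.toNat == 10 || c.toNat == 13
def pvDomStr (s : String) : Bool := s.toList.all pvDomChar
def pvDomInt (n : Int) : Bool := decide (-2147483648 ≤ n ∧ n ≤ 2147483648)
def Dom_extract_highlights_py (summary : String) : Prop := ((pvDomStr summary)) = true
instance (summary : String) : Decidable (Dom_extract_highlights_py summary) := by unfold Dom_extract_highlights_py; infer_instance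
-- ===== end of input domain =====

-- B replaces A's stateful in_timeline flag loop by a locate-then-filter decomposition (truncate at the first '- Key timeline:' marker, then filter); same cost, simpler.


-- ===== PORT A =====
-- helper shared by both Pythons: _format_summary
def pv_format_summary (summary : String) : String :=
  if PySem.Str.isIn "<summary>" summary && PySem.Str.isIn "</summary>" summary then
    let start := PySem.Str.find summary "<summary>" + 9
    let e := PySem.Str.find summary "</summary>"
    let inner := PySem.Str.strip (PySem.Str.slice summary (some start) (some e))
    "Summary:\n" ++ inner   -- literal '+' of two strings; exact here (plain concatenation)
  else PySem.Str.strip summary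

def pvStepA (st : List String × Bool) (line : String) : List String × Bool :=
  let stripped := PySem.Str.rstrip line
  if stripped = "" ∨ stripped = "Summary:" ∨ stripped = "Conversation summary:" then st
  else if stripped = "- Key timeline:" then (st.1, true)
  else if st.2 then st
  else (st.1 ++ [stripped], st.2)

def extract_highlights_py (summary : String) : List String :=
  let formatted := pv_format_summary summary
  ((PySem.Str.splitlines formatted).foldl pvStepA ([], false)).1

-- ===== PORT B =====
def extract_highlights_py_alt (summary : String) : List String :=
  let lines := (PySem.Str.splitlines (pv_format_summary summary)).map PySem.Str.rstrip
  let lines :=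
    if "- Key timeline:" ∈ lines then
      match PySem.List.index? lines "- Key timeline:" with
      | some k => PySem.List.slice lines none (some (k : Int))
      | none => lines
    else lines
  lines.filter (fun ln => !(ln == "" || ln == "Summary:" || ln == "Conversation summary:"))

-- ===== PRECONDITION & SPEC =====
def Spec_extract_highlights_py (summary : String) (out : List String) : Prop := out = extract_highlights_py_alt summary
instance (summary : String) (out : List String) : Decidable (Spec_extract_highlights_py summary out) := by unfold Spec_extract_highlights_py; infer_instance

-- ===== CLAIM (what is proved, stated in full; the proofs are below) =====
def Claim_equal_extract_highlights_py : Prop := ∀ (summary : String), Dom_extract_highlights_py summary → Spec_extract_highlights_py summary (extract_highlights_py summary)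

-- ===== LEMMAS AND PROOFS =====

-- proof-only helpers: B's filter predicate and B's truncation, phrased over a plain line list
def pvP (ln : String) : Bool := !(ln == "" || ln == "Summary:" || ln == "Conversation summary:")

def pvTrunc (ls : List String) : List String :=
  match PySem.List.index? ls "- Key timeline:" with
  | some k => ls.take k
  | none => ls

theorem pvStepA_true (acc : List String) (l : String) : pvStepA (acc, true) l = (acc, true) := by
  unfold pvStepA
  dsimp only
  split_ifs <;> simp_all

theorem foldl_true (ls : List String) (acc : List String) :
    (ls.foldl pvStepA (acc, true)).1 = acc := by
  induction ls generalizing acc with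
  | nil => rfl
  | cons l ls ih => rw [List.foldl_cons, pvStepA_true]; exact ih acc

theorem pvTrunc_cons (x : String) (ls : List String) :
    pvTrunc (x :: ls) = if x = "- Key timeline:" then [] else x :: pvTrunc ls := by
  by_cases hx : x = "- Key timeline:"
  · subst hx
    rw [pvTrunc, PySem.List.index?_cons_self]
    simp
  · rw [pvTrunc, PySem.List.index?_cons_of_ne ls hx, if_neg hx]
    cases h : PySem.List.index? ls "- Key timeline:" with
    | none => rw [pvTrunc, h]; rfl
    | some k => rw [pvTrunc, h]; rfl

theorem foldl_false (ls : List String) (acc : List String) :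
    (ls.foldl pvStepA (acc, false)).1
      = acc ++ (pvTrunc (ls.map PySem.Str.rstrip)).filter pvP := by
  induction ls generalizing acc with
  | nil => simp [pvTrunc, PySem.List.index?]
  | cons l ls ih =>
    by_cases hskip : PySem.Str.rstrip l = "" ∨ PySem.Str.rstrip l = "Summary:" ∨
        PySem.Str.rstrip l = "Conversation summary:"
    · have hm : PySem.Str.rstrip l ≠ "- Key timeline:" := by
        rcases hskip with h | h | h <;> rw [h] <;> decide
      have hp : pvP (PySem.Str.rstrip l) = false := by
        rcases hskip with h | h | h <;> rw [h] <;> decide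
      have hstep : pvStepA (acc, false) l = (acc, false) := by
        unfold pvStepA; simp [hskip]
      rw [List.foldl_cons, hstep, ih, List.map_cons, pvTrunc_cons, if_neg hm,
        List.filter_cons, hp]
      simp
    · by_cases hm : PySem.Str.rstrip l = "- Key timeline:"
      · have hstep : pvStepA (acc, false) l = (acc, true) := by
          unfold pvStepA; simp [hm]
        rw [List.foldl_cons, hstep, foldl_true, List.map_cons, pvTrunc_cons, if_pos hm,
          List.filter_nil, List.append_nil]
      · have hstep : pvStepA (acc, false) l = (acc ++ [PySem.Str.rstrip l], false) := by
          unfold pvStepA; simp [hskip, hm]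
        have hp : pvP (PySem.Str.rstrip l) = true := by
          obtain ⟨h1, h23⟩ := not_or.mp hskip
          obtain ⟨h2, h3⟩ := not_or.mp h23
          simp [pvP, h1, h2, h3]
        rw [List.foldl_cons, hstep, ih, List.map_cons, pvTrunc_cons, if_neg hm,
          List.filter_cons, hp]
        simp

theorem altBody (ls : List String) :
    ((if "- Key timeline:" ∈ ls then
        match PySem.List.index? ls "- Key timeline:" with
        | some k => PySem.List.slice ls none (some (k : Int))
        | none => ls
      else ls).filter fun ln => !(ln == "" || ln == "Summary:" || ln == "Conversation summary:"))
      = (pvTrunc ls).filter pvP := by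
  by_cases hmem : "- Key timeline:" ∈ ls
  · obtain ⟨k, hk⟩ := Option.isSome_iff_exists.mp ((PySem.List.index?_isSome_iff ls _).mpr hmem)
    rw [if_pos hmem, hk, pvTrunc, hk]
    dsimp only
    rw [PySem.List.slice_to_natCast]
    rfl
  · rw [if_neg hmem, pvTrunc, (PySem.List.index?_eq_none_iff ls _).mpr hmem]
    rfl

theorem alt_eq (summary : String) :
    extract_highlights_py_alt summary
      = (pvTrunc ((PySem.Str.splitlines (pv_format_summary summary)).map PySem.Str.rstrip)).filter pvP := by
  unfold extract_highlights_py_alt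
  exact altBody _

-- ===== VERDICT (by name: the statement is the Claim_ definition above) =====
theorem extract_highlights_py_spec : Claim_equal_extract_highlights_py := by
  intro summary _
  unfold Spec_extract_highlights_py extract_highlights_py
  rw [alt_eq, foldl_false]
  simp
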